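-- pv_equiv track=rewrite | github.com/lang-uk/choppa | choppa/utils.py | remove_block_quotes
-- ===== SOURCE A (Python) =====
-- def remove_block_quotes(pattern: str) -> str:
--     """
--     Replaces block quotes in regular expressions with normal quotes. For
--     example "\Qabc\E" will be replace with "\a\b\c".
--
--     @param pattern
--     @return pattern with replaced block quotes
--     """
--
--     pattern_builder: str = ""
--     quote: bool = False;
--     previous_char: str = ""
--
--     for current_char in pattern:
--         if quote:
--             if previous_char == '\\' and current_char == 'E':
--                 quote = False
--                 # Need to remove "\\" at the end as it has been added
--                 # in previous iteration.
--                 pattern_builder = pattern_builder[:-2]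
--             else:
--                 pattern_builder += '\\' + current_char
--
--         else:
--             if previous_char == '\\' and current_char == 'Q':
--                 quote = True
--                 # Need to remove "\" at the end as it has been added
--                 # in previous iteration.
--                 pattern_builder = pattern_builder[:-1]
--             else:
--                 pattern_builder += current_char
--         previous_char = current_char
--
--     return pattern_builder
-- ===== SOURCE B (Python) =====
-- def remove_block_quotes(pattern: str) -> str:
--     """Replaces \\Q...\\E block quotes with per-character escapes."""
--     out = []
--     i = 0
--     quote = False
--     n = len(pattern)
--     while i < n:
--         if not quote:
--             pos = pattern.find('\\Q', i)
--             if pos == -1: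
--                 out.append(pattern[i:])
--                 break
--             out.append(pattern[i:pos])
--             i = pos + 2
--             quote = True
--         else:
--             pos = pattern.find('\\E', i)
--             content = pattern[i:pos] if pos != -1 else pattern[i:]
--             out.append(''.join('\\' + c for c in content))
--             if pos == -1:
--                 break
--             i = pos + 2
--             quote = False
--     return ''.join(out)
-- ===== Notes on version B (the rewrite author's own statement) =====
-- stated objective: simpler
-- what changed: Replaced the per-character state machine with previous-char tracking and builder backtracking (slicing already-appended backslashes back off) by a find-and-jump scan that locates each block-quote delimiter with str.find and copies or escapes whole slices, never backtracking.
import Mathlib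
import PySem

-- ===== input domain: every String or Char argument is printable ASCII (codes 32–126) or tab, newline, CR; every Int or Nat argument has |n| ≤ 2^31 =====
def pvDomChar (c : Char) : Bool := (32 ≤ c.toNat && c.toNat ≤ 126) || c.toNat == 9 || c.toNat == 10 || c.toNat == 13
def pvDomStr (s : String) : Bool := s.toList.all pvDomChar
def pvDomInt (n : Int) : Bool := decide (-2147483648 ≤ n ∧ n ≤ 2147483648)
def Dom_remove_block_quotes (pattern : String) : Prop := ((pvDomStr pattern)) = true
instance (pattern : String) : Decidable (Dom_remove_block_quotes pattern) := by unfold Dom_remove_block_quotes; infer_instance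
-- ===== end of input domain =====

-- B drops A's per-character state machine for a find-and-jump scan over the
-- '\Q' / '\E' delimiter positions (objective: simpler decomposition; same output).

-- ===== PORT A =====
-- A's fold state: (pattern_builder, quote, previous_char); previous_char is a
-- Python string ("" initially, then one char), modelled as a List Char.
-- pattern_builder[:-1] / [:-2] are dropLast / dropLast.dropLast (exact: Python's
-- s[:-k] on a string shorter than k gives "", as dropLast does on []).
def pvStepA (st : List Char × Bool × List Char) (c : Char) : List Char × Bool × List Char :=
  match st with
  | (b, q, p) =>
    if q then
      if p = ['\\'] ∧ c = 'E' then (b.dropLast.dropLast, false, [c])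
      else (b ++ ['\\', c], true, [c])
    else
      if p = ['\\'] ∧ c = 'Q' then (b.dropLast, true, [c])
      else (b ++ [c], false, [c])

def remove_block_quotes (pattern : String) : String :=
  String.ofList (pattern.toList.foldl pvStepA ([], false, [])).1

-- ===== PORT B =====
-- pattern.find('\\' + y, i) from Source B: first index of the two-char pair in the
-- remaining suffix (exact: returns none where Python's find returns -1).
def pvFind2 (x y : Char) : List Char → Option Nat
  | [] => none
  | [_] => none
  | a :: b :: t => if a = x ∧ b = y then some 0 else (pvFind2 x y (b :: t)).map (· + 1)

theorem pvFind2_ne_nil {x y : Char} {l : List Char} {p : Nat}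
    (h : pvFind2 x y l = some p) : l ≠ [] := by
  intro hnil; subst hnil; simp [pvFind2] at h

-- the while loop of Source B: pvNormal is the 'not quote' arm, pvQuote the 'quote'
-- arm; the slices pattern[i:pos] / pattern[i:] become take / drop, and the
-- escaping ''.join('\\'+c for c in content) becomes flatMap.
mutual
def pvNormal (l : List Char) : List Char :=
  match h : pvFind2 '\\' 'Q' l with
  | none => l
  | some p => l.take p ++ pvQuote (l.drop (p + 2))
termination_by l.length
decreasing_by
  have := pvFind2_ne_nil h
  cases l with
  | nil => exact absurd rfl this
  | cons a t => simp
def pvQuote (l : List Char) : List Char :=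
  match h : pvFind2 '\\' 'E' l with
  | none => l.flatMap (fun c => ['\\', c])
  | some p => (l.take p).flatMap (fun c => ['\\', c]) ++ pvNormal (l.drop (p + 2))
termination_by l.length
decreasing_by
  have := pvFind2_ne_nil h
  cases l with
  | nil => exact absurd rfl this
  | cons a t => simp
end

def remove_block_quotes_alt (pattern : String) : String :=
  String.ofList (pvNormal pattern.toList)

-- ===== PRECONDITION & SPEC =====
def Spec_remove_block_quotes (pattern : String) (out : String) : Prop := out = remove_block_quotes_alt pattern
instance (pattern : String) (out : String) : Decidable (Spec_remove_block_quotes pattern out) := by unfold Spec_remove_block_quotes; infer_instance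

-- ===== CLAIM (what is proved, stated in full; the proofs are below) =====
def Claim_equal_remove_block_quotes : Prop := ∀ (pattern : String), Dom_remove_block_quotes pattern → Spec_remove_block_quotes pattern (remove_block_quotes pattern)

-- ===== LEMMAS AND PROOFS =====

theorem pvNormal_nil : pvNormal [] = [] := by
  rw [pvNormal]; simp [pvFind2]

theorem pvQuote_nil : pvQuote [] = [] := by
  rw [pvQuote]; simp [pvFind2]

theorem pvNormal_single (c : Char) : pvNormal [c] = [c] := by
  rw [pvNormal]; simp [pvFind2]

theorem pvQuote_single (c : Char) : pvQuote [c] = ['\\', c] := by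
  rw [pvQuote]; simp [pvFind2]

theorem pvNormal_pair (r : List Char) : pvNormal ('\\' :: 'Q' :: r) = pvQuote r := by
  rw [pvNormal]; simp [pvFind2]

theorem pvQuote_pair (r : List Char) : pvQuote ('\\' :: 'E' :: r) = pvNormal r := by
  rw [pvQuote]; simp [pvFind2]

theorem pvNormal_cons (c d : Char) (r : List Char) (h : ¬(c = '\\' ∧ d = 'Q')) :
    pvNormal (c :: d :: r) = c :: pvNormal (d :: r) := by
  rw [pvNormal, pvNormal]
  simp only [pvFind2]
  rw [if_neg h]
  cases hf : pvFind2 '\\' 'Q' (d :: r) with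
  | none => simp
  | some p => simp [List.take_succ_cons]

theorem pvQuote_cons (c d : Char) (r : List Char) (h : ¬(c = '\\' ∧ d = 'E')) :
    pvQuote (c :: d :: r) = '\\' :: c :: pvQuote (d :: r) := by
  rw [pvQuote, pvQuote]
  simp only [pvFind2]
  rw [if_neg h]
  cases hf : pvFind2 '\\' 'E' (d :: r) with
  | none => simp
  | some p => simp [List.take_succ_cons]

theorem pvNormal_cons_ne (c : Char) (r : List Char) (hc : c ≠ '\\') :
    pvNormal (c :: r) = c :: pvNormal r := by
  cases r with
  | nil => rw [pvNormal_single, pvNormal_nil]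
  | cons d t => exact pvNormal_cons c d t (by tauto)

theorem pvQuote_cons_ne (c : Char) (r : List Char) (hc : c ≠ '\\') :
    pvQuote (c :: r) = '\\' :: c :: pvQuote r := by
  cases r with
  | nil => rw [pvQuote_single, pvQuote_nil]
  | cons d t => exact pvQuote_cons c d t (by tauto)

-- master invariant: A's fold from each reachable state equals B's scan of the
-- rest (the primed variants carry the pending backslash already in the builder)
theorem pvMaster (n : Nat) : ∀ l : List Char, l.length = n →
    (∀ b p, p ≠ ['\\'] → (List.foldl pvStepA (b, false, p) l).1 = b ++ pvNormal l)
    ∧ (∀ b p, p ≠ ['\\'] → (List.foldl pvStepA (b, true, p) l).1 = b ++ pvQuote l)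
    ∧ (∀ b : List Char, (List.foldl pvStepA (b ++ ['\\'], false, ['\\']) l).1 = b ++ pvNormal ('\\' :: l))
    ∧ (∀ b : List Char, (List.foldl pvStepA (b ++ ['\\', '\\'], true, ['\\']) l).1 = b ++ pvQuote ('\\' :: l)) := by
  induction n using Nat.strong_induction_on with
  | _ n IH =>
  intro l hl
  cases l with
  | nil =>
    refine ⟨?_, ?_, ?_, ?_⟩
    · intro b p hp; simp [pvNormal_nil]
    · intro b p hp; simp [pvQuote_nil]
    · intro b; simp [pvNormal_single]
    · intro b; simp [pvQuote_single]
  | cons c rest =>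
    have hlen : rest.length < n := by simp at hl; omega
    obtain ⟨ih1, ih2, ih3, ih4⟩ := IH rest.length hlen rest rfl
    refine ⟨?_, ?_, ?_, ?_⟩
    · intro b p hp
      by_cases hc : c = '\\'
      · subst hc
        have hstep : pvStepA (b, false, p) '\\' = (b ++ ['\\'], false, ['\\']) := by
          simp [pvStepA, hp]
        simp only [List.foldl_cons, hstep]
        exact ih3 b
      · have hstep : pvStepA (b, false, p) c = (b ++ [c], false, [c]) := by
          simp [pvStepA, hp]
        simp only [List.foldl_cons, hstep]
        rw [ih1 (b ++ [c]) [c] (by simp [hc]), pvNormal_cons_ne c rest hc]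
        simp
    · intro b p hp
      by_cases hc : c = '\\'
      · subst hc
        have hstep : pvStepA (b, true, p) '\\' = (b ++ ['\\', '\\'], true, ['\\']) := by
          simp [pvStepA, hp]
        simp only [List.foldl_cons, hstep]
        exact ih4 b
      · have hstep : pvStepA (b, true, p) c = (b ++ ['\\', c], true, [c]) := by
          simp [pvStepA, hp]
        simp only [List.foldl_cons, hstep]
        rw [ih2 (b ++ ['\\', c]) [c] (by simp [hc]), pvQuote_cons_ne c rest hc]
        simp
    · intro b
      by_cases hq : c = 'Q'
      · subst hq
        have hstep : pvStepA (b ++ ['\\'], false, ['\\']) 'Q' = (b, true, ['Q']) := by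
          simp [pvStepA]
        simp only [List.foldl_cons, hstep]
        rw [ih2 b ['Q'] (by simp), pvNormal_pair]
      · by_cases hc : c = '\\'
        · subst hc
          have hstep : pvStepA (b ++ ['\\'], false, ['\\']) '\\' =
              ((b ++ ['\\']) ++ ['\\'], false, ['\\']) := by
            simp [pvStepA]
          simp only [List.foldl_cons, hstep]
          rw [ih3 (b ++ ['\\']), pvNormal_cons '\\' '\\' rest (by simp)]
          simp
        · have hstep : pvStepA (b ++ ['\\'], false, ['\\']) c = (b ++ ['\\', c], false, [c]) := by
            simp [pvStepA, hq]
          simp only [List.foldl_cons, hstep]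
          rw [ih1 (b ++ ['\\', c]) [c] (by simp [hc]),
            pvNormal_cons '\\' c rest (by simp [hq]), pvNormal_cons_ne c rest hc]
          simp
    · intro b
      by_cases he : c = 'E'
      · subst he
        have hstep : pvStepA (b ++ ['\\', '\\'], true, ['\\']) 'E' = (b, false, ['E']) := by
          simp [pvStepA]
        simp only [List.foldl_cons, hstep]
        rw [ih1 b ['E'] (by simp), pvQuote_pair]
      · by_cases hc : c = '\\'
        · subst hc
          have hstep : pvStepA (b ++ ['\\', '\\'], true, ['\\']) '\\' =
              ((b ++ ['\\', '\\']) ++ ['\\', '\\'], true, ['\\']) := by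
            simp [pvStepA]
          simp only [List.foldl_cons, hstep]
          rw [ih4 (b ++ ['\\', '\\']), pvQuote_cons '\\' '\\' rest (by simp)]
          simp
        · have hstep : pvStepA (b ++ ['\\', '\\'], true, ['\\']) c =
              (b ++ ['\\', '\\', '\\', c], true, [c]) := by
            simp [pvStepA, he]
          simp only [List.foldl_cons, hstep]
          rw [ih2 (b ++ ['\\', '\\', '\\', c]) [c] (by simp [hc]),
            pvQuote_cons '\\' c rest (by simp [he]), pvQuote_cons_ne c rest hc]
          simp

-- ===== VERDICT (by name: the statement is the Claim_ definition above) =====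
theorem remove_block_quotes_spec : Claim_equal_remove_block_quotes := by
  intro pattern _
  unfold Spec_remove_block_quotes remove_block_quotes remove_block_quotes_alt
  rw [(pvMaster pattern.toList.length pattern.toList rfl).1 [] [] (by simp)]
  simp
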